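-- pv_equiv track=rewrite | github.com/finlaymcnally/RecipeImporter | cookimport/cli_support/bench_cache.py | _all_method_prediction_reuse_summary
-- ===== SOURCE A (Python) =====
-- from collections import defaultdict
-- from typing import Any
--
-- def _all_method_prediction_reuse_summary(
--     rows: list[dict[str, Any]],
-- ) -> dict[str, int]:
--     successful_rows = [
--         row
--         for row in rows
--         if str(row.get("status") or "").strip().lower() == "ok"
--     ]
--     prediction_signatures_unique = len(
--         {
--             str(row.get("prediction_reuse_key") or "").strip()
--             for row in successful_rows
--             if str(row.get("prediction_reuse_key") or "").strip()
--         }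
--     )
--     prediction_runs_executed = sum(
--         1
--         for row in successful_rows
--         if str(row.get("prediction_result_source") or "").strip().lower() == "executed"
--     )
--     prediction_results_reused_in_run = sum(
--         1
--         for row in successful_rows
--         if str(row.get("prediction_result_source") or "").strip().lower()
--         == "reused_in_run"
--     )
--     prediction_results_reused_cross_run = sum(
--         1
--         for row in successful_rows
--         if str(row.get("prediction_result_source") or "").strip().lower()
--         == "reused_cross_run"
--     )
--
--     split_convert_groups: dict[str, list[dict[str, Any]]] = defaultdict(list)
--     for row in successful_rows:
--         split_key = str(row.get("prediction_split_convert_input_key") or "").strip()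
--         if not split_key:
--             continue
--         split_convert_groups[split_key].append(row)
--     split_convert_input_groups = len(split_convert_groups)
--     split_convert_reuse_candidates = sum(
--         max(0, len(group_rows) - 1) for group_rows in split_convert_groups.values()
--     )
--     split_convert_reuse_safe_candidates = 0
--     split_convert_reuse_blocked_by_prediction_variance = 0
--     for group_rows in split_convert_groups.values():
--         if len(group_rows) <= 1:
--             continue
--         candidate_count = len(group_rows) - 1
--         prediction_keys = {
--             str(row.get("prediction_reuse_key") or "").strip()
--             for row in group_rows
--             if str(row.get("prediction_reuse_key") or "").strip()
--         }
--         if len(prediction_keys) <= 1: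
--             split_convert_reuse_safe_candidates += candidate_count
--         else:
--             split_convert_reuse_blocked_by_prediction_variance += candidate_count
--
--     return {
--         "prediction_signatures_unique": prediction_signatures_unique,
--         "prediction_runs_executed": prediction_runs_executed,
--         "prediction_results_reused_in_run": prediction_results_reused_in_run,
--         "prediction_results_reused_cross_run": prediction_results_reused_cross_run,
--         "split_convert_input_groups": split_convert_input_groups,
--         "split_convert_reuse_candidates": split_convert_reuse_candidates,
--         "split_convert_reuse_safe_candidates": split_convert_reuse_safe_candidates,
--         "split_convert_reuse_blocked_by_prediction_variance": (
--             split_convert_reuse_blocked_by_prediction_variance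
--         ),
--     }
-- ===== SOURCE B (Python) =====
-- from collections import Counter
--
--
-- def _all_method_prediction_reuse_summary(rows):
--     ok = [r for r in rows if str(r.get("status") or "").strip().lower() == "ok"]
--     pred_keys = [str(r.get("prediction_reuse_key") or "").strip() for r in ok]
--     split_keys = [
--         str(r.get("prediction_split_convert_input_key") or "").strip() for r in ok
--     ]
--     sources = Counter(
--         str(r.get("prediction_result_source") or "").strip().lower() for r in ok
--     )
--     distinct_splits = list(dict.fromkeys(k for k in split_keys if k))
--     candidates = 0
--     safe = 0
--     blocked = 0
--     for k in distinct_splits: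
--         group_pks = [pk for sk, pk in zip(split_keys, pred_keys) if sk == k]
--         extra = len(group_pks) - 1
--         if extra > 0:
--             candidates += extra
--             if len({p for p in group_pks if p}) <= 1:
--                 safe += extra
--             else:
--                 blocked += extra
--     return {
--         "prediction_signatures_unique": len({p for p in pred_keys if p}),
--         "prediction_runs_executed": sources["executed"],
--         "prediction_results_reused_in_run": sources["reused_in_run"],
--         "prediction_results_reused_cross_run": sources["reused_cross_run"],
--         "split_convert_input_groups": len(distinct_splits),
--         "split_convert_reuse_candidates": candidates,
--         "split_convert_reuse_safe_candidates": safe,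
--         "split_convert_reuse_blocked_by_prediction_variance": blocked,
--     }
-- ===== Notes on version B (the rewrite author's own statement) =====
-- stated objective: alternative
-- what changed: A builds a defaultdict mapping each split key to the list of its full rows in one grouping pass and then rescans those stored row groups; B never builds a dict of rows: it extracts the three normalised key columns once, counts sources with a collections.Counter, dedups the nonempty split keys via dict.fromkeys, and recomputes each group on demand by filtering the zipped (split_key, pred_key) columns per distinct key.
import Mathlib
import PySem

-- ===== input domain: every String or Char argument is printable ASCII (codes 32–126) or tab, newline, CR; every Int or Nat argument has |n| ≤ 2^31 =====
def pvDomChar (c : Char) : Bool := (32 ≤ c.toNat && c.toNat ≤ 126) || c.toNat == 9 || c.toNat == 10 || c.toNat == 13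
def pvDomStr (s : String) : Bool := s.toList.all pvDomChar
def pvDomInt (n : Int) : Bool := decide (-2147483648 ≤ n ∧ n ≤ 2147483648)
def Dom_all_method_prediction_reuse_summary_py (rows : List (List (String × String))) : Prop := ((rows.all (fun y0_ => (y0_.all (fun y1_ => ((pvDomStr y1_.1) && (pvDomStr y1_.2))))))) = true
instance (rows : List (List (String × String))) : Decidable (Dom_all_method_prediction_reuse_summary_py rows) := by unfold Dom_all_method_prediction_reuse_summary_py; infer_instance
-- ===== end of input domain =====

-- B drops A's defaultdict-of-rows grouping entirely: it extracts the pred/split/source key columns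
-- once, counts sources with a Counter, dedups the nonempty split keys, and recomputes each group by
-- filtering the zipped key columns per distinct key (objective: alternative decomposition).

-- shared normalisation helpers: str(row.get(k) or "").strip() [and .lower()]
def pvStrip (row : List (String × String)) (k : String) : String :=
  PySem.Str.strip (PySem.Dict.getD (PySem.Dict.mk row) k "")
def pvStripLower (row : List (String × String)) (k : String) : String :=
  PySem.Str.lower (pvStrip row k)
def pvOk (row : List (String × String)) : Bool := pvStripLower row "status" == "ok"
def pvPk (row : List (String × String)) : String := pvStrip row "prediction_reuse_key"
def pvSrc (row : List (String × String)) : String := pvStripLower row "prediction_result_source"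
def pvSk (row : List (String × String)) : String := pvStrip row "prediction_split_convert_input_key"

-- ===== PORT A =====
-- loop body of A's defaultdict(list) grouping loop (continue on empty split key; append the row)
def pvStepGroupsA (d : PySem.Dict String (List (List (String × String)))) (r : List (String × String)) :
    PySem.Dict String (List (List (String × String))) :=
  if pvSk r == "" then d else d.modify (pvSk r) [] (fun g => g ++ [r])

-- loop body of A's safe/blocked loop over the group values
def pvStepSafeA (p : Int × Int) (g : List (List (String × String))) : Int × Int :=
  if g.length ≤ 1 then p
  else
    let cc : Int := (g.length : Int) - 1
    if PySem.Set.len (PySem.Set.ofList (List.filter (fun s => s != "") (g.map (fun r => pvPk r)))) ≤ 1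
    then (p.1 + cc, p.2)
    else (p.1, p.2 + cc)

def all_method_prediction_reuse_summary_py (rows : List (List (String × String))) : List (String × Int) :=
  let successful := rows.filter (fun r => pvOk r)
  -- len({... for row in successful if ...})
  let sigUnique : Int :=
    PySem.Set.len (PySem.Set.ofList (List.filter (fun s => s != "") (successful.map (fun r => pvPk r))))
  -- the three sum(1 for row in successful if ...) generators
  let executed : Int := (successful.countP (fun r => pvSrc r == "executed") : Int)
  let reusedInRun : Int := (successful.countP (fun r => pvSrc r == "reused_in_run") : Int)
  let reusedCrossRun : Int := (successful.countP (fun r => pvSrc r == "reused_cross_run") : Int)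
  let groups := successful.foldl pvStepGroupsA PySem.Dict.empty
  let inputGroups : Int := (groups.size : Int)
  let candidates : Int := (groups.values.map (fun g => max 0 ((g.length : Int) - 1))).sum
  let sb : Int × Int := groups.values.foldl pvStepSafeA (0, 0)
  [("prediction_signatures_unique", sigUnique),
   ("prediction_runs_executed", executed),
   ("prediction_results_reused_in_run", reusedInRun),
   ("prediction_results_reused_cross_run", reusedCrossRun),
   ("split_convert_input_groups", inputGroups),
   ("split_convert_reuse_candidates", candidates),
   ("split_convert_reuse_safe_candidates", sb.1),
   ("split_convert_reuse_blocked_by_prediction_variance", sb.2)]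

-- ===== PORT B =====
-- loop body of B's 'for k in distinct_splits' loop; pairs = zip(split_keys, pred_keys),
-- acc = (candidates, safe, blocked)
def pvStepB (pairs : List (String × String)) (acc : Int × Int × Int) (k : String) : Int × Int × Int :=
  let groupPks := (pairs.filter (fun p => p.1 == k)).map (fun p => p.2)
  let extra : Int := (groupPks.length : Int) - 1
  if 0 < extra then
    (acc.1 + extra,
     if PySem.Set.len (PySem.Set.ofList (groupPks.filter (fun p => p != ""))) ≤ 1
     then (acc.2.1 + extra, acc.2.2)
     else (acc.2.1, acc.2.2 + extra))
  else acc

def all_method_prediction_reuse_summary_py_alt (rows : List (List (String × String))) : List (String × Int) :=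
  let ok := rows.filter (fun r => pvOk r)
  let predKeys := ok.map (fun r => pvPk r)
  let splitKeys := ok.map (fun r => pvSk r)
  let sources := PySem.Dict.counter (ok.map (fun r => pvSrc r))
  let distinctSplits := PySem.List.dedup (splitKeys.filter (fun k => k != ""))
  let agg := distinctSplits.foldl (pvStepB (splitKeys.zip predKeys)) (0, 0, 0)
  [("prediction_signatures_unique",
      PySem.Set.len (PySem.Set.ofList (predKeys.filter (fun p => p != "")))),
   ("prediction_runs_executed", sources.getD "executed" 0),
   ("prediction_results_reused_in_run", sources.getD "reused_in_run" 0),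
   ("prediction_results_reused_cross_run", sources.getD "reused_cross_run" 0),
   ("split_convert_input_groups", (distinctSplits.length : Int)),
   ("split_convert_reuse_candidates", agg.1),
   ("split_convert_reuse_safe_candidates", agg.2.1),
   ("split_convert_reuse_blocked_by_prediction_variance", agg.2.2)]

-- ===== PRECONDITION & SPEC =====
def Spec_all_method_prediction_reuse_summary_py (rows : List (List (String × String))) (out : List (String × Int)) : Prop := out = all_method_prediction_reuse_summary_py_alt rows
instance (rows : List (List (String × String))) (out : List (String × Int)) : Decidable (Spec_all_method_prediction_reuse_summary_py rows out) := by unfold Spec_all_method_prediction_reuse_summary_py; infer_instance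

-- ===== CLAIM (what is proved, stated in full; the proofs are below) =====
def Claim_equal_all_method_prediction_reuse_summary_py : Prop := ∀ (rows : List (List (String × String))), Dom_all_method_prediction_reuse_summary_py rows → Spec_all_method_prediction_reuse_summary_py rows (all_method_prediction_reuse_summary_py rows)

-- ===== LEMMAS AND PROOFS =====

-- the (split key, row) stream fed into A's dict fold
def pvPairsA (l : List (List (String × String))) : List (String × List (String × String)) :=
  l.filterMap (fun r => if pvSk r == "" then none else some (pvSk r, r))

theorem pvDictA_pairs (l : List (List (String × String))) (d : PySem.Dict String (List (List (String × String)))) :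
    l.foldl pvStepGroupsA d = (pvPairsA l).foldl (fun d p => d.modify p.1 [] (fun g => g ++ [p.2])) d := by
  rw [pvPairsA, List.foldl_filterMap]
  congr 1
  funext d r
  by_cases h : pvSk r = "" <;> simp [pvStepGroupsA, h]

theorem pvPairsA_cons (r : List (String × String)) (l : List (List (String × String))) :
    pvPairsA (r :: l) = (if pvSk r = "" then [] else [(pvSk r, r)]) ++ pvPairsA l := by
  by_cases h : pvSk r = "" <;> simp [pvPairsA, h]

theorem pvPairsA_fst (l : List (List (String × String))) :
    (pvPairsA l).map (fun p => p.1) = (l.map (fun r => pvSk r)).filter (fun k => k != "") := by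
  induction l with
  | nil => rfl
  | cons r l ih =>
    rw [pvPairsA_cons]
    by_cases h : pvSk r = "" <;> simp [h, ih]

theorem pvKeysA (l : List (List (String × String))) :
    (l.foldl pvStepGroupsA PySem.Dict.empty).keys =
      PySem.Set.ofList ((l.map (fun r => pvSk r)).filter (fun k => k != "")) := by
  rw [pvDictA_pairs,
    PySem.Dict.keys_foldl_modify_key (pvPairsA l) (fun p => p.1) [] (fun _ p => fun g => g ++ [p.2]),
    ← pvPairsA_fst]
  simp [PySem.Set.update, PySem.Set.ofList_eq_foldl, PySem.Dict.keys, PySem.Dict.empty]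

-- A's group for a nonempty key k is exactly the ok rows whose split key is k
-- A's group for a nonempty key k is exactly the ok rows whose split key is k
theorem pvGetDA (l : List (List (String × String))) (k : String) (hk : k ≠ "") :
    (l.foldl pvStepGroupsA PySem.Dict.empty).getD k [] = l.filter (fun r => pvSk r == k) := by
  rw [pvDictA_pairs, PySem.Dict.getD_foldl_modify_append]
  simp only [PySem.Dict.getD_empty, List.nil_append]
  induction l with
  | nil => rfl
  | cons r l ih =>
    rw [pvPairsA_cons]
    by_cases h : pvSk r = ""
    · have h2 : pvSk r ≠ k := fun hh => hk (hh.symm.trans h)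
      simp [h, ih, hk]
    · by_cases h2 : pvSk r = k
      · simp [h2, ih, hk]
      · simp [h, h2, ih]

-- B's zipped column filter recomputes the prediction keys of that group
theorem pvZipFilter (l : List (List (String × String))) (k : String) :
    (((l.map (fun r => pvSk r)).zip (l.map (fun r => pvPk r))).filter
        (fun p => p.1 == k)).map (fun p => p.2) =
      (l.filter (fun r => pvSk r == k)).map (fun r => pvPk r) := by
  rw [List.zip_map']
  induction l with
  | nil => rfl
  | cons r l ih =>
    by_cases h : pvSk r == k <;> simp [h, ih]

-- B's per-distinct-key loop equals A's candidates sum plus A's safe/blocked loop, given that for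
-- each key in ks the zipped-filter group is the pvPk image of the row group G k
theorem pvPhase2 (pairs : List (String × String)) (ks : List String)
    (G : String → List (List (String × String)))
    (hG : ∀ k ∈ ks, ((pairs.filter (fun p => p.1 == k)).map (fun p => p.2)) =
        (G k).map (fun r => pvPk r))
    (c s b : Int) :
    ks.foldl (pvStepB pairs) (c, s, b) =
      (c + ((ks.map G).map (fun g => max 0 ((g.length : Int) - 1))).sum,
       (ks.map G).foldl pvStepSafeA (s, b)) := by
  induction ks generalizing c s b with
  | nil => simp
  | cons k ks ih =>
    have hk := hG k (List.mem_cons_self ..)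
    simp only [List.map_cons, List.foldl_cons, List.sum_cons, pvStepB, pvStepSafeA, hk, List.length_map]
    by_cases hg : (G k).length ≤ 1
    · rw [if_neg (show ¬ (0 : Int) < ((G k).length : Int) - 1 by omega), if_pos hg,
        ih (fun k hk => hG k (List.mem_cons_of_mem _ hk))]
      have hmax : max 0 (((G k).length : Int) - 1) = 0 := by omega
      rw [hmax]; ring_nf
    · rw [if_pos (show (0 : Int) < ((G k).length : Int) - 1 by omega), if_neg hg]
      have hmax : max 0 (((G k).length : Int) - 1) = ((G k).length : Int) - 1 := by omega
      by_cases hvar : PySem.Set.len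
          (PySem.Set.ofList (List.filter (fun s => s != "") ((G k).map (fun r => pvPk r)))) ≤ 1
      · rw [if_pos hvar, ih (fun k hk => hG k (List.mem_cons_of_mem _ hk)), hmax, Prod.mk.injEq]
        exact ⟨by ring, rfl⟩
      · rw [if_neg hvar, ih (fun k hk => hG k (List.mem_cons_of_mem _ hk)), hmax, Prod.mk.injEq]
        exact ⟨by ring, rfl⟩

theorem pvCount (l : List (List (String × String))) (s : String) :
    ((PySem.Dict.counter (l.map (fun r => pvSrc r))).getD s 0) =
      (l.countP (fun r => pvSrc r == s) : Int) := by
  rw [PySem.Dict.getD_counter]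
  norm_cast
  rw [List.count_eq_countP, List.countP_map]
  rfl

theorem all_method_prediction_reuse_summary_py_spec' (rows : List (List (String × String))) :
    all_method_prediction_reuse_summary_py rows = all_method_prediction_reuse_summary_py_alt rows := by
  simp only [all_method_prediction_reuse_summary_py, all_method_prediction_reuse_summary_py_alt]
  set ok := rows.filter (fun r => pvOk r) with hok
  have hkeys := pvKeysA ok
  have hdedup : PySem.List.dedup ((ok.map (fun r => pvSk r)).filter (fun k => k != "")) =
      (ok.foldl pvStepGroupsA PySem.Dict.empty).keys := by
    rw [hkeys, PySem.List.dedup_eq_ofList]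
  have hndA : ((ok.foldl pvStepGroupsA PySem.Dict.empty).keys).Nodup := by
    rw [hkeys]; exact PySem.Set.nodup_ofList _
  have hG : ∀ k ∈ (ok.foldl pvStepGroupsA PySem.Dict.empty).keys,
      ((((ok.map (fun r => pvSk r)).zip (ok.map (fun r => pvPk r))).filter
          (fun p => p.1 == k)).map (fun p => p.2)) =
        ((ok.foldl pvStepGroupsA PySem.Dict.empty).getD k []).map (fun r => pvPk r) := by
    intro k hkmem
    have hk : k ≠ "" := by
      rw [hkeys] at hkmem
      have := (PySem.Set.mem_ofList _ _).1 hkmem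
      rcases List.mem_filter.1 this with ⟨-, h2⟩
      simpa using h2
    rw [pvGetDA ok k hk, pvZipFilter]
  have hvals : (ok.foldl pvStepGroupsA PySem.Dict.empty).values =
      ((ok.foldl pvStepGroupsA PySem.Dict.empty).keys).map
        (fun k => (ok.foldl pvStepGroupsA PySem.Dict.empty).getD k []) :=
    PySem.Dict.values_eq_map_keys _ hndA []
  have hsize : ((ok.foldl pvStepGroupsA PySem.Dict.empty).size : Int) =
      (((ok.foldl pvStepGroupsA PySem.Dict.empty).keys).length : Int) := by
    simp [PySem.Dict.size, PySem.Dict.keys]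
  rw [hdedup,
    pvPhase2 _ _ (fun k => (ok.foldl pvStepGroupsA PySem.Dict.empty).getD k []) hG 0 0 0,
    pvCount, pvCount, pvCount, hvals, hsize]
  simp

-- ===== VERDICT (by name: the statement is the Claim_ definition above) =====
theorem all_method_prediction_reuse_summary_py_spec : Claim_equal_all_method_prediction_reuse_summary_py := by
  intro rows _
  exact all_method_prediction_reuse_summary_py_spec' rows
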